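-- pv_equiv track=rewrite | github.com/Aperyon/advent-of-code | 2024/day_02/main_02.py | second_try
-- ===== SOURCE A (Python) =====
-- from itertools import pairwise, product
--
-- def second_try(report):
--     bound = lambda x, y: 1 <= abs(x - y) <= 3
--     results = []
--     for i in range(0, len(report)):
--         new_report = [*report]
--         new_report.pop(i)
--         consistent = False
--         consistent = new_report == sorted(new_report) or new_report == sorted(
--             new_report, reverse=True
--         )
--         current = (
--             all([c(*v) for v, c in product(pairwise(new_report), [bound])])
--             and consistent
--         )
--         results.append(current)
--     return results
-- ===== SOURCE B (Python) =====
-- def second_try(report):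
--     n = len(report)
--     up = lambda x: 1 <= x <= 3
--     dn = lambda x: -3 <= x <= -1
--     d = [y - x for x, y in zip(report, report[1:])]
--     # preU[k] / preD[k]: all of d[0:k] ascending-valid / descending-valid
--     preU, preD, u, v = [True], [True], True, True
--     for x in d:
--         u = u and up(x)
--         v = v and dn(x)
--         preU.append(u)
--         preD.append(v)
--     # sufU[k] / sufD[k]: all of d[k:] ascending-valid / descending-valid
--     sufU, sufD, u, v = [True], [True], True, True
--     for x in reversed(d):
--         u = u and up(x)
--         v = v and dn(x)
--         sufU.append(u)
--         sufD.append(v)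
--     sufU.reverse()
--     sufD.reverse()
--     res = []
--     for i in range(n):
--         if i == 0:
--             ok = n == 1 or sufU[1] or sufD[1]
--         elif i == n - 1:
--             ok = preU[n - 2] or preD[n - 2]
--         else:
--             m = d[i - 1] + d[i]
--             ok = (preU[i - 1] and up(m) and sufU[i + 1]) or (
--                 preD[i - 1] and dn(m) and sufD[i + 1]
--             )
--         res.append(ok)
--     return res
-- ===== Notes on version B (the rewrite author's own statement) =====
-- stated objective: faster
-- what changed: Instead of re-sorting and re-scanning a fresh copy of the report for every removal index, B computes the adjacent-difference list once, builds prefix/suffix valid-ascending/valid-descending flag arrays, and answers each removal index in O(1) from those flags plus the one merged difference.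
import Mathlib
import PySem

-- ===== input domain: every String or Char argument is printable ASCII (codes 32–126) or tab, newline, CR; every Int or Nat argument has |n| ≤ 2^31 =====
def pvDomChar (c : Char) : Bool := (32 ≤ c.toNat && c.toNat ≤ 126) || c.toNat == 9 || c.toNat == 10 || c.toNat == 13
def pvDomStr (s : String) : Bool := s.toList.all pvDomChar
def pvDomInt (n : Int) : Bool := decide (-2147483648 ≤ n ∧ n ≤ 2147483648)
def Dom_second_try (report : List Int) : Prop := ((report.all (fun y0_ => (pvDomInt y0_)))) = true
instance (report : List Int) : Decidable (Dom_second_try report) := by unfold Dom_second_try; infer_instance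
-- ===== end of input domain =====

-- B replaces A's per-index copy/sort/rescan with one precomputed difference list plus
-- prefix/suffix validity flags, answering each removal index in O(1) (objective: faster).

-- ===== PORT A =====
-- bound = lambda x, y: 1 <= abs(x - y) <= 3
def pvBound (x y : Int) : Bool := decide (1 ≤ |x - y| ∧ |x - y| ≤ 3)

def second_try (report : List Int) : List Bool :=
  (PySem.List.pyRange 0 (PySem.List.len report) 1).foldl (fun results i =>
    -- new_report = [*report]; new_report.pop(i)   (i always in range; getD default unreachable)
    let new_report := ((PySem.List.pop? report i).map (·.2)).getD []
    let consistent :=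
      decide (new_report = PySem.List.sorted new_report (fun x => x) false) ||
      decide (new_report = PySem.List.sorted new_report (fun x => x) true)
    -- all([c(*v) for v, c in product(pairwise(new_report), [bound])])
    let current :=
      (((new_report.zip new_report.tail).map (fun v => pvBound v.1 v.2)).all id) && consistent
    results ++ [current]) []

-- ===== PORT B =====
def pvUp (x : Int) : Bool := decide (1 ≤ x ∧ x ≤ 3)
def pvDn (x : Int) : Bool := decide (-3 ≤ x ∧ x ≤ -1)

-- one step of Source B's flag loop: u = u and up(x); v = v and dn(x); append both
def pvScanStep (st : (List Bool × List Bool) × Bool × Bool) (x : Int) :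
    (List Bool × List Bool) × Bool × Bool :=
  let u := st.2.1 && pvUp x
  let v := st.2.2 && pvDn x
  ((st.1.1 ++ [u], st.1.2 ++ [v]), u, v)

def second_try_alt (report : List Int) : List Bool :=
  let n : Int := PySem.List.len report
  -- d = [y - x for x, y in zip(report, report[1:])]
  let d := (report.zip (PySem.List.slice report (some 1) none)).map (fun p => p.2 - p.1)
  let pre := d.foldl pvScanStep (([true], [true]), true, true)
  let preU := pre.1.1
  let preD := pre.1.2
  let suf := d.reverse.foldl pvScanStep (([true], [true]), true, true)
  let sufU := suf.1.1.reverse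
  let sufD := suf.1.2.reverse
  (PySem.List.pyRange 0 n 1).foldl (fun res i =>
    let ok :=
      if i == 0 then
        decide (n = 1) || PySem.List.pyGetD sufU 1 true || PySem.List.pyGetD sufD 1 true
      else if i == n - 1 then
        PySem.List.pyGetD preU (n - 2) true || PySem.List.pyGetD preD (n - 2) true
      else
        let m := PySem.List.pyGetD d (i - 1) 0 + PySem.List.pyGetD d i 0
        (PySem.List.pyGetD preU (i - 1) true && pvUp m && PySem.List.pyGetD sufU (i + 1) true) ||
        (PySem.List.pyGetD preD (i - 1) true && pvDn m && PySem.List.pyGetD sufD (i + 1) true)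
    res ++ [ok]) []

-- ===== PRECONDITION & SPEC =====
def Spec_second_try (report : List Int) (out : List Bool) : Prop := out = second_try_alt report
instance (report : List Int) (out : List Bool) : Decidable (Spec_second_try report out) := by unfold Spec_second_try; infer_instance

-- ===== CLAIM (what is proved, stated in full; the proofs are below) =====
def Claim_equal_second_try : Prop := ∀ (report : List Int), Dom_second_try report → Spec_second_try report (second_try report)


-- ===== LEMMAS AND PROOFS =====

-- adjacent differences of a list (the d of Source B)
def pvDiffs (l : List Int) : List Int := (l.zip l.tail).map (fun p => p.2 - p.1)

-- common reference value for one removal index: all diffs ascending-valid or all descending-valid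
def pvValid (l : List Int) : Bool := (pvDiffs l).all pvUp || (pvDiffs l).all pvDn

theorem pvDiffs_cons₂ (x y : Int) (t : List Int) :
    pvDiffs (x :: y :: t) = (y - x) :: pvDiffs (y :: t) := rfl

theorem pv_isChain_iff_zip (r : Int → Int → Prop) (l : List Int) :
    List.IsChain r l ↔ ∀ p ∈ l.zip l.tail, r p.1 p.2 := by
  induction l with
  | nil => simp
  | cons x t ih =>
    cases t with
    | nil => simp
    | cons y s =>
      rw [List.isChain_cons_cons]
      simp only [List.tail_cons, List.zip_cons_cons, List.mem_cons]
      constructor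
      · rintro ⟨hr, hc⟩ p (rfl | hp)
        · exact hr
        · exact (ih.mp hc) p hp
      · intro h
        exact ⟨h _ (Or.inl rfl), ih.mpr (fun p hp => h p (Or.inr hp))⟩

theorem pv_sorted_iff (l : List Int) :
    l = PySem.List.sorted l (fun x => x) false ↔ ∀ p ∈ l.zip l.tail, p.1 ≤ p.2 := by
  rw [← pv_isChain_iff_zip, List.isChain_iff_pairwise]
  constructor
  · intro h
    have := PySem.List.sorted_pairwise l (fun x => x)
    rw [← h] at this
    exact this
  · intro h
    exact (PySem.List.sorted_eq_self_of_pairwise l (fun x => x) h).symm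

theorem pv_sorted_rev_iff (l : List Int) :
    l = PySem.List.sorted l (fun x => x) true ↔ ∀ p ∈ l.zip l.tail, p.2 ≤ p.1 := by
  rw [← pv_isChain_iff_zip (fun a b => b ≤ a) l, List.isChain_iff_pairwise]
  constructor
  · intro h
    have := PySem.List.sorted_pairwise_rev l (fun x => x)
    rw [← h] at this
    exact this
  · intro h
    exact (PySem.List.sorted_rev_eq_self_of_pairwise l (fun x => x) h).symm

theorem pvA_cell (l : List Int) :
    ((((l.zip l.tail).map (fun v => pvBound v.1 v.2)).all id) &&
      (decide (l = PySem.List.sorted l (fun x => x) false) ||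
       decide (l = PySem.List.sorted l (fun x => x) true))) = pvValid l := by
  apply Bool.eq_iff_iff.mpr
  simp only [pvValid, pvDiffs, List.all_map, Bool.and_eq_true, Bool.or_eq_true,
    decide_eq_true_eq, List.all_eq_true, Function.comp, pvBound, pvUp, pvDn,
    pv_sorted_iff, pv_sorted_rev_iff, id]
  constructor
  · rintro ⟨hb, h | h⟩
    · left
      intro p hp
      have h1 := hb p hp
      have h2 := h p hp
      rcases abs_cases (p.1 - p.2) with ⟨he, _⟩ | ⟨he, _⟩ <;> omega
    · right
      intro p hp
      have h1 := hb p hp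
      have h2 := h p hp
      rcases abs_cases (p.1 - p.2) with ⟨he, _⟩ | ⟨he, _⟩ <;> omega
  · rintro (h | h)
    · refine ⟨fun p hp => ?_, Or.inl fun p hp => ?_⟩ <;>
      · have := h p hp
        rcases abs_cases (p.1 - p.2) with ⟨he, _⟩ | ⟨he, _⟩ <;> omega
    · refine ⟨fun p hp => ?_, Or.inr fun p hp => ?_⟩ <;>
      · have := h p hp
        rcases abs_cases (p.1 - p.2) with ⟨he, _⟩ | ⟨he, _⟩ <;> omega

theorem pvA_eq_map (report : List Int) :
    second_try report = (List.range report.length).map (fun i => pvValid (report.eraseIdx i)) := by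
  unfold second_try
  rw [PySem.List.len_eq, PySem.List.pyRange_zero_nat, List.foldl_map,
    PySem.List.foldl_append_singleton_eq_map]
  simp only [List.nil_append]
  apply List.map_congr_left
  intro k hk
  rw [List.mem_range] at hk
  rw [PySem.List.pop?_natCast report k hk]
  simp only [Option.map_some, Option.getD_some]
  exact pvA_cell _

theorem pv_scan_spec (ds : List Int) (aU aD : List Bool) (u v : Bool) :
    ds.foldl pvScanStep ((aU, aD), u, v) =
      ((aU ++ (List.range ds.length).map (fun k => u && ((ds.take (k+1)).all pvUp)),
        aD ++ (List.range ds.length).map (fun k => v && ((ds.take (k+1)).all pvDn))),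
       u && ds.all pvUp, v && ds.all pvDn) := by
  induction ds generalizing aU aD u v with
  | nil => simp
  | cons x t ih =>
    rw [List.foldl_cons]
    show List.foldl pvScanStep ((aU ++ [u && pvUp x], aD ++ [v && pvDn x]), u && pvUp x, v && pvDn x) t = _
    rw [ih]
    simp only [List.length_cons, List.range_succ_eq_map, List.map_cons, List.map_map,
      List.take_succ_cons, List.all_cons, List.append_assoc, List.cons_append,
      List.nil_append, Bool.and_assoc]
    simp

theorem pv_pre_spec (ds : List Int) :
    ds.foldl pvScanStep (([true], [true]), true, true) =
      (((List.range (ds.length+1)).map (fun k => (ds.take k).all pvUp),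
        (List.range (ds.length+1)).map (fun k => (ds.take k).all pvDn)),
       ds.all pvUp, ds.all pvDn) := by
  rw [pv_scan_spec]
  simp [List.range_succ_eq_map, List.map_map, Function.comp]

theorem pv_pre_getD (ds : List Int) (f : Int → Bool) (k : Nat) (hk : k ≤ ds.length) :
    PySem.List.pyGetD ((List.range (ds.length+1)).map (fun j => (ds.take j).all f)) (k : Int) true
      = (ds.take k).all f := by
  rw [PySem.List.pyGetD_natCast]
  rw [List.getD_eq_getElem?_getD]
  rw [List.getElem?_map]
  simp [Nat.lt_succ_of_le hk]

theorem pv_suf_getD (ds : List Int) (f : Int → Bool) (k : Nat) (hk : k ≤ ds.length) :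
    PySem.List.pyGetD ((List.range (ds.length+1)).map (fun j => (ds.reverse.take j).all f)).reverse (k : Int) true
      = (ds.drop k).all f := by
  rw [PySem.List.pyGetD_natCast]
  rw [List.getD_eq_getElem?_getD, List.getElem?_reverse (by simpa using Nat.lt_succ_of_le hk)]
  simp only [List.length_map, List.length_range]
  rw [List.getElem?_map]
  rw [List.getElem?_range (by omega)]
  simp only [Option.map_some, Option.getD_some]
  rw [show ds.length + 1 - 1 - k = ds.length - k by omega]
  rw [List.take_reverse, List.all_reverse]
  congr 1
  congr 1
  omega

theorem pvDiffs_eraseIdx_zero (l : List Int) :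
    pvDiffs (l.eraseIdx 0) = (pvDiffs l).drop 1 := by
  match l with
  | [] => rfl
  | [x] => rfl
  | x :: y :: t => simp [pvDiffs_cons₂, List.eraseIdx]

theorem pvDiffs_eraseIdx_last (l : List Int) (i : Nat) (h1 : 1 ≤ i) (h2 : i + 1 = l.length) :
    pvDiffs (l.eraseIdx i) = (pvDiffs l).take (i - 1) := by
  induction i generalizing l with
  | zero => omega
  | succ j ih =>
    match l with
    | x :: y :: t =>
      cases j with
      | zero =>
        match t with
        | [] => rfl
      | succ j' =>
        match t with
        | z :: t' =>
          rw [show (x :: y :: z :: t').eraseIdx (j'+1+1) = x :: ((y :: z :: t').eraseIdx (j'+1)) from rfl]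
          rw [show (y :: z :: t').eraseIdx (j'+1) = y :: ((z :: t').eraseIdx j') from rfl]
          rw [pvDiffs_cons₂]
          rw [show (y - x) :: pvDiffs (y :: (z :: t').eraseIdx j')
              = (y - x) :: pvDiffs ((y :: z :: t').eraseIdx (j'+1)) from rfl]
          rw [ih (y :: z :: t') (by omega) (by simp at h2 ⊢; omega)]
          simp [pvDiffs_cons₂]

theorem pvDiffs_eraseIdx_mid (l : List Int) (i : Nat) (h1 : 1 ≤ i) (h2 : i + 1 < l.length) :
    pvDiffs (l.eraseIdx i) =
      (pvDiffs l).take (i-1) ++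
        ((pvDiffs l).getD (i-1) 0 + (pvDiffs l).getD i 0) :: (pvDiffs l).drop (i+1) := by
  induction i generalizing l with
  | zero => omega
  | succ j ih =>
    match l with
    | x :: y :: t =>
      cases j with
      | zero =>
        match t with
        | z :: t' =>
          rw [show (x :: y :: z :: t').eraseIdx 1 = x :: z :: t' from rfl]
          rw [pvDiffs_cons₂, pvDiffs_cons₂, pvDiffs_cons₂]
          simp
          try ring
      | succ j' =>
        match t with
        | z :: t' =>
          rw [show (x :: y :: z :: t').eraseIdx (j'+1+1) = x :: ((y :: z :: t').eraseIdx (j'+1)) from rfl]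
          rw [show (y :: z :: t').eraseIdx (j'+1) = y :: ((z :: t').eraseIdx j') from rfl]
          rw [pvDiffs_cons₂]
          rw [show (y - x) :: pvDiffs (y :: (z :: t').eraseIdx j')
              = (y - x) :: pvDiffs ((y :: z :: t').eraseIdx (j'+1)) from rfl]
          rw [ih (y :: z :: t') (by omega) (by simp at h2 ⊢; omega)]
          simp [pvDiffs_cons₂]

theorem pvB_eq_map (report : List Int) :
    second_try_alt report = (List.range report.length).map (fun i => pvValid (report.eraseIdx i)) := by
  unfold second_try_alt
  simp only []
  rw [PySem.List.len_eq, PySem.List.slice_from_one]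
  rw [show (report.zip report.tail).map (fun p => p.2 - p.1) = pvDiffs report from rfl]
  rw [pv_pre_spec, pv_pre_spec]
  rw [PySem.List.pyRange_zero_nat, List.foldl_map, PySem.List.foldl_append_singleton_eq_map]
  simp only [List.nil_append, List.length_reverse]
  apply List.map_congr_left
  intro k hk
  rw [List.mem_range] at hk
  have hd : (pvDiffs report).length = report.length - 1 := by
    cases report <;> simp [pvDiffs, List.length_zip]
  by_cases hk0 : k = 0
  · subst hk0
    simp only [Nat.cast_zero, beq_self_eq_true, if_true]
    by_cases h1 : report.length = 1
    · simp [h1, pvValid]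
      match report, h1 with
      | [x], _ => simp [pvDiffs]
    · have h2 : 2 ≤ report.length := by omega
      rw [show (decide ((report.length:Int) = 1)) = false by simp; exact_mod_cast h1]
      rw [show ((1:Int)) = ((1:Nat):Int) by norm_num]
      rw [pv_suf_getD _ _ 1 (by omega), pv_suf_getD _ _ 1 (by omega)]
      simp only [Bool.false_or]
      rw [pvValid, pvDiffs_eraseIdx_zero]
  · by_cases hlast : k + 1 = report.length
    · have hne : ¬((k:Int) == 0) = true := by simp; exact_mod_cast hk0
      have heq : ((k:Int) == (report.length:Int) - 1) = true := by
        simp; omega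
      simp only [hne, heq, if_false, if_true, Bool.false_eq_true]
      rw [show ((report.length:Int) - 2) = ((k-1:Nat):Int) by omega]
      rw [pv_pre_getD _ _ (k-1) (by omega), pv_pre_getD _ _ (k-1) (by omega)]
      rw [pvValid, pvDiffs_eraseIdx_last report k (by omega) hlast]
    · have hne : ¬((k:Int) == 0) = true := by simp; exact_mod_cast hk0
      have hne2 : ¬((k:Int) == (report.length:Int) - 1) = true := by
        simp; omega
      simp only [hne, hne2, if_false, Bool.false_eq_true]
      rw [show ((k:Int) - 1) = ((k-1:Nat):Int) by omega]
      rw [show ((k:Int) + 1) = ((k+1:Nat):Int) by omega]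
      rw [pv_pre_getD _ _ (k-1) (by omega), pv_pre_getD _ _ (k-1) (by omega),
        pv_suf_getD _ _ (k+1) (by omega), pv_suf_getD _ _ (k+1) (by omega)]
      rw [PySem.List.pyGetD_natCast, PySem.List.pyGetD_natCast]
      rw [pvValid, pvDiffs_eraseIdx_mid report k (by omega) (by omega)]
      simp [List.all_append, Bool.and_assoc]

-- ===== VERDICT (by name: the statement is the Claim_ definition above) =====
theorem second_try_spec : Claim_equal_second_try := by
  intro report _
  unfold Spec_second_try
  rw [pvA_eq_map, pvB_eq_map]
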